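-- pv_equiv track=rewrite | github.com/malarsaravanan1991/Reflected-Convolution | relected_conv.py | mirrored_image
-- ===== SOURCE A (Python) =====
-- def mirrored_image(image_matrix: list,
--                     image_height: int,
--                     image_width: int,
--                     kernel_height: int):
--     """
--     Forms mirrored image by reflecting the x axis and y axis
--     Returns :
--         mirrored_image(list): 3ximage_height, 3ximage_width
--     """
--     xaxis_mirrored_image = reflect_xaxis_image(image_matrix,image_height,image_width)
--     yaxis_mirrored_image = reflect_yaxis_image(image_matrix,image_height,image_width)
--
--     #TODO make it infinite rather than repeat 3
--     mid_row = (3 % 2)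
--     mirrored_image = []
--     inter_list = []
--
--     odd_row = list(range(1,3,2))
--     even_row = list(range(0,3,2))
--
--     if mid_row in odd_row:
--         image_row = odd_row
--         reflect_row = even_row
--     else:
--         image_row = even_row
--         reflect_row = odd_row
--     inter_value = 0
--
--     for i in range((3*image_height)):
--         if int(i / image_height) in image_row:
--            row = 'xaxisrow'
--
--         else:
--             row = 'yaxisrow'
--
--         if inter_value > (image_height-1):
--                 inter_value = 0
--
--         for j in range(3):
--             if j == mid_row and row == 'xaxisrow':
--                inter_list.extend(xaxis_mirrored_image[inter_value][::-1])
--             elif row == 'xaxisrow':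
--                 inter_list.extend(xaxis_mirrored_image[inter_value])
--
--             if j == mid_row and row == 'yaxisrow':
--                inter_list.extend(yaxis_mirrored_image[inter_value])
--             elif row == 'yaxisrow':
--                 inter_list.extend(yaxis_mirrored_image[inter_value][::-1])
--
--         mirrored_image.append(inter_list)
--         inter_list = []
--         inter_value += 1
--     return mirrored_image
--
-- def reflect_xaxis_image(image_matrix: list,
--                     image_height: int,
--                     image_width: int):
--         "Function that reflects the image horizontally along x axis"
--
--         xaxis_mirrored_image = []
--         for i in range(image_height):
--             xaxis_mirrored_image.append(image_matrix[i][::-1])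
--         return xaxis_mirrored_image
--
-- def reflect_yaxis_image(image_matrix: list,
--                     image_height: int,
--                     image_width: int):
--         "Function that reflects the image vertically along y axis"
--         yaxis_mirrored_image = []
--         for i in reversed(range(image_height)):
--             yaxis_mirrored_image.append(image_matrix[i])
--         return yaxis_mirrored_image
-- ===== SOURCE B (Python) =====
-- def mirrored_image(image_matrix: list,
--                     image_height: int,
--                     image_width: int,
--                     kernel_height: int):
--     """Build only the middle strip (rev + row + rev for each original row),
--     then obtain both outer bands at once as the vertical mirror of that strip:
--     the whole result is outer + mid + outer.  No band loop, no recomputation."""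
--     mid = []
--     for r in range(image_height):
--         row = image_matrix[r]
--         rev = row[::-1]
--         mid.append(rev + row + rev)
--     outer = mid[::-1]
--     return outer + mid + outer
-- ===== Notes on version B (the rewrite author's own statement) =====
-- stated objective: simpler
-- what changed: Instead of looping over all 3*image_height output rows with label/counter bookkeeping and per-row reversals, B builds only the middle strip in one pass over the original rows and derives both outer bands as a single vertical reversal of that strip, returning outer + mid + outer.
import Mathlib
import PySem

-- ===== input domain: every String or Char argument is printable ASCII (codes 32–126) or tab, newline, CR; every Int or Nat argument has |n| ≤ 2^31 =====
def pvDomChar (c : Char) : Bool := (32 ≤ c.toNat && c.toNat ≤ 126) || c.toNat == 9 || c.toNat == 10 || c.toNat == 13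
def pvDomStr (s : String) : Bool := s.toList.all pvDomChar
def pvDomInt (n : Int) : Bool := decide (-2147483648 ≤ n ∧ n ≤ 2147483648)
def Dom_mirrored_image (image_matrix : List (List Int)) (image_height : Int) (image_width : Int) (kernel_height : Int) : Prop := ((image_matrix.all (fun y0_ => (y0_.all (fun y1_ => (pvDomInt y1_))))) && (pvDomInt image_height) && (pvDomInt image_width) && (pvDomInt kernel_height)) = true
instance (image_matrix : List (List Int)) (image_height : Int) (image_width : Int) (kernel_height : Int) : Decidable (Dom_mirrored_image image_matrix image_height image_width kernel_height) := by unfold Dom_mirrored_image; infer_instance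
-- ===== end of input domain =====

-- B builds only the middle strip in one pass and derives both outer bands as one
-- vertical reversal of that strip (outer ++ mid ++ outer); simpler decomposition, same cost.

-- ===== PORT A =====
-- out-of-range image_matrix[i] raises IndexError in Python; ported with pyGetD (default []),
-- such inputs are excluded by Pre_mirrored_image.
def pv_reflect_xaxis (image_matrix : List (List Int)) (image_height : Int) : List (List Int) :=
  (PySem.List.pyRange 0 image_height 1).foldl
    (fun acc i => acc ++ [(PySem.List.pyGetD image_matrix i []).reverse]) []

def pv_reflect_yaxis (image_matrix : List (List Int)) (image_height : Int) : List (List Int) :=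
  (PySem.List.pyRange 0 image_height 1).reverse.foldl
    (fun acc i => acc ++ [PySem.List.pyGetD image_matrix i []]) []

def mirrored_image (image_matrix : List (List Int)) (image_height : Int) (image_width : Int) (kernel_height : Int) : List (List Int) :=
  let xa := pv_reflect_xaxis image_matrix image_height
  let ya := pv_reflect_yaxis image_matrix image_height
  let mid_row := PySem.Int.mod 3 2
  let odd_row := PySem.List.pyRange 1 3 2
  let even_row := PySem.List.pyRange 0 3 2
  let image_row := if mid_row ∈ odd_row then odd_row else even_row
  -- int(i / image_height) is exact truncating division on the admitted |n| ≤ 2^31 domain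
  let st := (PySem.List.pyRange 0 (3 * image_height) 1).foldl
    (fun (st : List (List Int) × Int) i =>
      let row := if PySem.Int.truncdiv i image_height ∈ image_row then "xaxisrow" else "yaxisrow"
      let iv := if st.2 > image_height - 1 then 0 else st.2
      let inter := (PySem.List.pyRange 0 3 1).foldl
        (fun (il : List Int) j =>
          let il1 := if j = mid_row ∧ row = "xaxisrow" then il ++ (PySem.List.pyGetD xa iv []).reverse
                     else if row = "xaxisrow" then il ++ PySem.List.pyGetD xa iv []
                     else il
          if j = mid_row ∧ row = "yaxisrow" then il1 ++ PySem.List.pyGetD ya iv []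
          else if row = "yaxisrow" then il1 ++ (PySem.List.pyGetD ya iv []).reverse
          else il1) []
      (st.1 ++ [inter], iv + 1)) ([], 0)
  st.1

-- ===== PORT B =====
def mirrored_image_alt (image_matrix : List (List Int)) (image_height : Int) (image_width : Int) (kernel_height : Int) : List (List Int) :=
  let mid := (PySem.List.pyRange 0 image_height 1).foldl
    (fun acc r =>
      let row := PySem.List.pyGetD image_matrix r []
      let rev := row.reverse
      acc ++ [rev ++ row ++ rev]) []
  let outer := mid.reverse
  outer ++ mid ++ outer

-- ===== PRECONDITION & SPEC =====
-- Python A raises IndexError iff image_height exceeds the number of rows; Pre_ excludes exactly that.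
def Pre_mirrored_image (image_matrix : List (List Int)) (image_height : Int) (image_width : Int) (kernel_height : Int) : Prop :=
  image_height ≤ (image_matrix.length : Int)
instance (image_matrix : List (List Int)) (image_height : Int) (image_width : Int) (kernel_height : Int) : Decidable (Pre_mirrored_image image_matrix image_height image_width kernel_height) := by unfold Pre_mirrored_image; infer_instance

def pvWitness_mirrored_image : List (List Int) × Int × Int × Int := ([[1, 2], [3, 4]], 2, 2, 3)

def Spec_mirrored_image (image_matrix : List (List Int)) (image_height : Int) (image_width : Int) (kernel_height : Int) (out : List (List Int)) : Prop := out = mirrored_image_alt image_matrix image_height image_width kernel_height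
instance (image_matrix : List (List Int)) (image_height : Int) (image_width : Int) (kernel_height : Int) (out : List (List Int)) : Decidable (Spec_mirrored_image image_matrix image_height image_width kernel_height out) := by unfold Spec_mirrored_image; infer_instance

-- ===== CLAIM (what is proved, stated in full; the proofs are below) =====
def Claim_equal_mirrored_image : Prop := ∀ (image_matrix : List (List Int)) (image_height : Int) (image_width : Int) (kernel_height : Int), Dom_mirrored_image image_matrix image_height image_width kernel_height → Pre_mirrored_image image_matrix image_height image_width kernel_height → Spec_mirrored_image image_matrix image_height image_width kernel_height (mirrored_image image_matrix image_height image_width kernel_height)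

-- ===== LEMMAS AND PROOFS =====

-- the common closed form: row r of band b
def pvRowB (m : List (List Int)) (hn : Nat) (b r : Nat) : List Int :=
  let src := if b = 1 then m.getD r [] else m.getD (hn - 1 - r) []
  src.reverse ++ src ++ src.reverse

-- the inter_value counter after n iterations of A's loop
def pvIv (hn n : Nat) : Int := if n = 0 then 0 else ((n - 1) % hn : Nat) + 1

lemma pvIv_reset (hn n : Nat) (hpos : 0 < hn) :
    (if pvIv hn n > (hn : Int) - 1 then 0 else pvIv hn n) = ((n % hn : Nat) : Int) := by
  cases n with
  | zero => simp [pvIv]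
  | succ k =>
      have ha : k % hn < hn := Nat.mod_lt _ hpos
      have hdm : hn * (k / hn) + k % hn = k := Nat.div_add_mod k hn
      simp only [pvIv, Nat.succ_ne_zero, if_false, Nat.add_sub_cancel]
      by_cases hc : ((k % hn : Nat) : Int) + 1 > (hn : Int) - 1
      · rw [if_pos hc]
        have he : k % hn = hn - 1 := by omega
        have h2 : k + 1 = hn * (k / hn) + hn := by omega
        have h0 : (k + 1) % hn = 0 := by rw [h2, Nat.mul_add_mod, Nat.mod_self]
        simp [h0]
      · rw [if_neg hc]
        have he : k % hn + 1 < hn := by omega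
        have h1 : k + 1 = hn * (k / hn) + (k % hn + 1) := by omega
        have h0 : (k + 1) % hn = k % hn + 1 := by
          rw [h1, Nat.mul_add_mod, Nat.mod_eq_of_lt he]
        simp [h0]

lemma getD_reverse_map_range {α : Type} (f : Nat → α) (hn v : Nat) (hv : v < hn) (d : α) :
    (((List.range hn).map f).reverse).getD v d = f (hn - 1 - v) := by
  have hlen : (((List.range hn).map f).reverse).length = hn := by simp
  rw [List.getD_eq_getElem _ _ (by omega)]
  rw [List.getElem_reverse]
  simp

lemma pv_reflect_xaxis_eq (m : List (List Int)) (hn : Nat) :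
    pv_reflect_xaxis m (hn : Int) = (List.range hn).map (fun i => (m.getD i []).reverse) := by
  unfold pv_reflect_xaxis
  rw [PySem.List.pyRange_zero_natCast, List.foldl_map]
  rw [PySem.List.foldl_append_singleton_eq_map]
  simp [PySem.List.pyGetD_natCast]

lemma pv_reflect_yaxis_eq (m : List (List Int)) (hn : Nat) :
    pv_reflect_yaxis m (hn : Int) = ((List.range hn).map (fun i => m.getD i [])).reverse := by
  unfold pv_reflect_yaxis
  rw [PySem.List.pyRange_zero_natCast, ← List.map_reverse, List.foldl_map]
  rw [PySem.List.foldl_append_singleton_eq_map]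
  simp [PySem.List.pyGetD_natCast, List.map_reverse]

lemma truncdiv_natCast' (n k : Nat) : PySem.Int.truncdiv (n : Int) (k : Int) = ((n / k : Nat) : Int) := by
  simp [PySem.Int.truncdiv]

lemma foldl_loop_generic (m : List (List Int)) (hn : Nat)
    (g : List (List Int) × Int → Int → List (List Int) × Int)
    (hg : ∀ (acc : List (List Int)) (n : Nat),
        g (acc, pvIv hn n) (n : Int) = (acc ++ [pvRowB m hn (n / hn) (n % hn)], pvIv hn (n + 1)))
    (n : Nat) :
    ((List.range n).map (fun k : Nat => (k : Int))).foldl g ([], 0) =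
      ((List.range n).map (fun i => pvRowB m hn (i / hn) (i % hn)), pvIv hn n) := by
  induction n with
  | zero => simp [pvIv]
  | succ k ih =>
      simp only [List.range_succ, List.map_append, List.map_cons, List.map_nil, List.foldl_concat]
      rw [ih, hg]

lemma A_eq (m : List (List Int)) (w k : Int) (hn : Nat) (hpos : 0 < hn) :
    mirrored_image m (hn : Int) w k =
      (List.range (3 * hn)).map (fun i => pvRowB m hn (i / hn) (i % hn)) := by
  unfold mirrored_image
  have hmid : PySem.Int.mod 3 2 = 1 := by decide
  have hodd : PySem.List.pyRange 1 3 2 = [1] := by decide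
  have hcast : (3 : Int) * (hn : Int) = ((3 * hn : Nat) : Int) := by push_cast; ring
  have h3 : PySem.List.pyRange 0 3 1 = [0, 1, 2] := by decide
  simp only []
  rw [hcast, PySem.List.pyRange_zero_natCast]
  rw [foldl_loop_generic m hn]
  intro acc n
  simp only [hmid, hodd]
  rw [if_pos (show (1 : Int) ∈ ([1] : List Int) by simp)]
  rw [truncdiv_natCast' n hn, pvIv_reset hn n hpos]
  rw [pv_reflect_xaxis_eq, pv_reflect_yaxis_eq]
  have hmod : n % hn < hn := Nat.mod_lt _ hpos
  have hxa : PySem.List.pyGetD ((List.range hn).map (fun i => (m.getD i []).reverse)) ((n % hn : Nat) : Int) []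
      = (m.getD (n % hn) []).reverse := by
    rw [PySem.List.pyGetD_natCast, PySem.List.getD_map_range _ _ _ _ hmod]
  have hya : PySem.List.pyGetD (((List.range hn).map (fun i => m.getD i [])).reverse) ((n % hn : Nat) : Int) []
      = m.getD (hn - 1 - n % hn) [] := by
    rw [PySem.List.pyGetD_natCast, getD_reverse_map_range _ _ _ hmod]
  by_cases hb : n / hn = 1
  · have hm : (((n / hn : Nat) : Int) ∈ ([1] : List Int)) := by simp [hb]
    rw [if_pos hm, h3, hxa, hya]
    simp [List.foldl, pvRowB, pvIv, hb]
  · have hm : ¬ (((n / hn : Nat) : Int) ∈ ([1] : List Int)) := by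
      simp only [List.mem_singleton]
      exact_mod_cast fun h => hb (by exact_mod_cast h)
    rw [if_neg hm, h3, hxa, hya]
    simp [List.foldl, pvRowB, pvIv, hb]

lemma reverse_map_range {α : Type} (f : Nat → α) (n : Nat) :
    ((List.range n).map f).reverse = (List.range n).map (fun i => f (n - 1 - i)) := by
  apply List.ext_getElem
  · simp
  · intro i h1 h2
    simp only [List.length_reverse, List.length_map, List.length_range] at h1
    rw [List.getElem_reverse]
    simp only [List.getElem_map, List.getElem_range, List.length_map, List.length_range]

lemma B_eq (m : List (List Int)) (w k : Int) (hn : Nat) :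
    mirrored_image_alt m (hn : Int) w k =
      (List.range hn).map (pvRowB m hn 0) ++ (List.range hn).map (pvRowB m hn 1)
        ++ (List.range hn).map (pvRowB m hn 2) := by
  unfold mirrored_image_alt
  have hmid : (PySem.List.pyRange 0 (hn : Int) 1).foldl
      (fun acc r =>
        let row := PySem.List.pyGetD m r []
        let rev := row.reverse
        acc ++ [rev ++ row ++ rev]) []
      = (List.range hn).map (pvRowB m hn 1) := by
    rw [PySem.List.pyRange_zero_natCast, List.foldl_map,
      PySem.List.foldl_append_singleton_eq_map, List.nil_append]
    apply List.map_congr_left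
    intro r _
    simp [pvRowB, PySem.List.pyGetD_natCast]
  have houter : ((List.range hn).map (pvRowB m hn 1)).reverse
      = (List.range hn).map (pvRowB m hn 0) := by
    rw [reverse_map_range]
    apply List.map_congr_left
    intro r hr
    rw [List.mem_range] at hr
    simp [pvRowB]
  have h02 : (List.range hn).map (pvRowB m hn 0) = (List.range hn).map (pvRowB m hn 2) := by
    apply List.map_congr_left
    intro r _
    simp [pvRowB]
  simp only [hmid, houter]
  rw [← h02, List.append_assoc]

lemma split_eq (m : List (List Int)) (hn : Nat) (hpos : 0 < hn) :
    (List.range (3 * hn)).map (fun i => pvRowB m hn (i / hn) (i % hn)) =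
      (List.range hn).map (pvRowB m hn 0) ++ (List.range hn).map (pvRowB m hn 1)
        ++ (List.range hn).map (pvRowB m hn 2) := by
  have h3 : 3 * hn = hn + (hn + hn) := by ring
  simp only [h3, List.range_add, List.map_append, List.map_map]
  rw [List.append_assoc]
  congr 1
  · apply List.map_congr_left
    intro i hi
    rw [List.mem_range] at hi
    rw [Nat.div_eq_of_lt hi, Nat.mod_eq_of_lt hi]
  congr 1
  · apply List.map_congr_left
    intro i hi
    rw [List.mem_range] at hi
    have e1 : hn + i = i + hn := by ring
    simp only [Function.comp_apply, e1, Nat.add_div_right _ hpos, Nat.add_mod_right,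
      Nat.div_eq_of_lt hi, Nat.mod_eq_of_lt hi]
  · apply List.map_congr_left
    intro i hi
    rw [List.mem_range] at hi
    have e1 : hn + (hn + i) = i + hn + hn := by ring
    simp only [Function.comp_apply, e1, Nat.add_div_right _ hpos, Nat.add_mod_right,
      Nat.div_eq_of_lt hi, Nat.mod_eq_of_lt hi]

-- ===== VERDICT (by name: the statement is the Claim_ definition above) =====
theorem mirrored_image_spec : Claim_equal_mirrored_image := by
  intro m h w k _hdom _hpre
  unfold Spec_mirrored_image
  by_cases hpos : 0 < h
  · obtain ⟨hn, rfl⟩ : ∃ hn : Nat, h = (hn : Int) := ⟨h.toNat, (Int.toNat_of_nonneg (le_of_lt hpos)).symm⟩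
    have hpn : 0 < hn := by exact_mod_cast hpos
    rw [A_eq m w k hn hpn, B_eq m w k hn, split_eq m hn hpn]
  · -- image_height ≤ 0: both loops are empty, both return []
    have hle : h ≤ 0 := by omega
    have hA : PySem.List.pyRange 0 (3 * h) 1 = [] := PySem.List.pyRange_one_eq_nil (by omega)
    have hB : PySem.List.pyRange 0 h 1 = [] := PySem.List.pyRange_one_eq_nil (by omega)
    unfold mirrored_image mirrored_image_alt
    rw [hA, hB]
    simp [List.foldl]
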